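-- pv_equiv track=rewrite | github.com/wfelow/pacman | aktueller_stand.py | finde_geister_positionen
-- ===== SOURCE A (Python) =====
-- block = 30
--
-- def finde_geister_positionen(layout):
--     geister_positionen = {
--         'r': None,
--         'o': None,
--         'p': None,
--         't': None #Buchstaben haben noch keine x und y Koordinate
--     }
--     for y, row in enumerate(layout):
--         for x, cell in enumerate(row):
--             if cell in geister_positionen:  # Wenn der Buchstabe 'r', 'o', 'p' oder 't' gefunden wurde
--                 geister_positionen[cell] = (x * block + block // 2, y * block + block // 2)  # Speichern der Positionen
--     return geister_positionen
-- ===== SOURCE B (Python) =====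
-- block = 30
--
-- def finde_geister_positionen(layout):
--     # Per-ghost search: for each of the four letters scan the grid backwards
--     # (last row-major occurrence first) and stop at the first hit.
--     def letzte_position(ch):
--         for y in range(len(layout) - 1, -1, -1):
--             row = layout[y]
--             for x in range(len(row) - 1, -1, -1):
--                 if row[x] == ch:
--                     return (x * block + block // 2, y * block + block // 2)
--         return None
--     return {ch: letzte_position(ch) for ch in 'ropt'}
-- ===== Notes on version B (the rewrite author's own statement) =====
-- stated objective: alternative
-- what changed: A makes one pass over every grid cell updating a 4-key dict (last write wins); B instead searches per ghost character, scanning rows and cells backwards and stopping at the first hit, which is the last row-major occurrence.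
import Mathlib
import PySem

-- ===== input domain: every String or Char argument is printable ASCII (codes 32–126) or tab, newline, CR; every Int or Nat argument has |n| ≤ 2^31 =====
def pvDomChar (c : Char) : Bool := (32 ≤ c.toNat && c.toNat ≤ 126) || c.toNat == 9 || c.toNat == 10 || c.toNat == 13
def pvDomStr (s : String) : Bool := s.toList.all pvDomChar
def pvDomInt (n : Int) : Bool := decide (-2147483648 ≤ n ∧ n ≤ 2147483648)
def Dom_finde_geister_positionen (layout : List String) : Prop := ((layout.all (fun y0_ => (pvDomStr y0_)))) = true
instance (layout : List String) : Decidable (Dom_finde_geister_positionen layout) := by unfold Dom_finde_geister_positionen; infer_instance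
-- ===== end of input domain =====

-- B replaces A's single pass over all cells (dict last-write-wins) by four per-ghost
-- backward scans that stop at the first (= row-major last) occurrence; objective: alternative.


-- module constant 'block = 30'
def pvBlock : Int := 30

-- ===== PORT A =====
-- one pass over every cell; the dict keeps the four ghost keys, later hits overwrite
def finde_geister_positionen (layout : List String) : List (String × Option (Int × Int)) :=
  ((PySem.List.enumerate layout 0).foldl (fun d p =>
      (PySem.List.enumerate p.2.toList 0).foldl (fun d q =>
        if d.contains (String.singleton q.2) then
          d.insert (String.singleton q.2)
            (some (q.1 * pvBlock + PySem.Int.floordiv pvBlock 2,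
                   p.1 * pvBlock + PySem.Int.floordiv pvBlock 2))
        else d) d)
    (PySem.Dict.ofList [("r", none), ("o", none), ("p", none), ("t", none)])).items

-- ===== PORT B =====
-- inner loop: for x in range(len(row)-1, -1, -1): early return on row[x] == ch
def fgpInner (row : List Char) (ch : Char) (y : Int) : List Int → Option (Int × Int)
  | [] => none
  | x :: rest =>
      if PySem.List.pyGetD row x ' ' = ch then
        some (x * pvBlock + PySem.Int.floordiv pvBlock 2,
              y * pvBlock + PySem.Int.floordiv pvBlock 2)
      else fgpInner row ch y rest

-- outer loop: for y in range(len(layout)-1, -1, -1), early return on first row hit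
def fgpRows (layout : List String) (ch : Char) : List Int → Option (Int × Int)
  | [] => none
  | y :: rest =>
      let row := (PySem.List.pyGetD layout y "").toList
      match fgpInner row ch y (PySem.List.pyRange ((row.length : Int) - 1) (-1) (-1)) with
      | some r => some r
      | none => fgpRows layout ch rest

def finde_geister_positionen_alt (layout : List String) : List (String × Option (Int × Int)) :=
  (['r', 'o', 'p', 't'] : List Char).map (fun ch =>
    (String.singleton ch,
     fgpRows layout ch (PySem.List.pyRange ((layout.length : Int) - 1) (-1) (-1))))

-- ===== PRECONDITION & SPEC =====
def Spec_finde_geister_positionen (layout : List String) (out : List (String × Option (Int × Int))) : Prop := out = finde_geister_positionen_alt layout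
instance (layout : List String) (out : List (String × Option (Int × Int))) : Decidable (Spec_finde_geister_positionen layout out) := by unfold Spec_finde_geister_positionen; infer_instance

-- ===== CLAIM (what is proved, stated in full; the proofs are below) =====
def Claim_equal_finde_geister_positionen : Prop := ∀ (layout : List String), Dom_finde_geister_positionen layout → Spec_finde_geister_positionen layout (finde_geister_positionen layout)

-- ===== LEMMAS AND PROOFS =====

-- the four-key dict shape A's loop preserves
def mkD (a b c d : Option (Int × Int)) : PySem.Dict String (Option (Int × Int)) :=
  PySem.Dict.mk [("r", a), ("o", b), ("p", c), ("t", d)]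

-- the value one cell contributes for one ghost character
def cellHit (ch : Char) (y : Int) (q : Int × Char) : Option (Int × Int) :=
  if q.2 = ch then
    some (q.1 * pvBlock + PySem.Int.floordiv pvBlock 2,
          y * pvBlock + PySem.Int.floordiv pvBlock 2)
  else none

-- last (row-major) hit of one ghost character within one row
def rowHit (ch : Char) (y : Int) (row : List Char) : Option (Int × Int) :=
  (PySem.List.enumerate row 0).reverse.findSome? (cellHit ch y)

theorem ne_singleton_of_toList {k : String} {kc c : Char}
    (hk : k.toList = [kc]) (hne : c ≠ kc) : k ≠ String.singleton c := by
  intro h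
  apply hne
  have h2 := congrArg String.toList h
  rw [hk, String.toList_singleton] at h2
  simpa using h2.symm

-- last-write-wins fold = first hit from the right, with fallback
theorem foldl_or_eq_findSome_reverse {α β : Type} (l : List α) (f : α → Option β) (v : Option β) :
    l.foldl (fun v q => (f q).or v) v = (l.reverse.findSome? f).or v := by
  induction l generalizing v with
  | nil => simp
  | cons q rest ih =>
      simp [List.foldl_cons, ih, List.findSome?_append, Option.or_assoc]

-- one cell of A's inner loop on the four-key dict
set_option maxHeartbeats 1000000 in
theorem stepA_mkD (a b c d : Option (Int × Int)) (y : Int) (q : Int × Char) :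
    (if (mkD a b c d).contains (String.singleton q.2) then
        (mkD a b c d).insert (String.singleton q.2)
          (some (q.1 * pvBlock + PySem.Int.floordiv pvBlock 2,
                 y * pvBlock + PySem.Int.floordiv pvBlock 2))
      else mkD a b c d)
    = mkD ((cellHit 'r' y q).or a) ((cellHit 'o' y q).or b)
          ((cellHit 'p' y q).or c) ((cellHit 't' y q).or d) := by
  obtain ⟨qx, qc⟩ := q
  by_cases h1 : qc = 'r'
  · subst h1
    simp [mkD, cellHit, PySem.Dict.contains_mk,
      show String.singleton 'r' = "r" from by decide]
    apply PySem.Dict.ext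
    simp [PySem.Dict.items_insert_of_contains, PySem.Dict.contains_mk]
  by_cases h2 : qc = 'o'
  · subst h2
    simp [mkD, cellHit, PySem.Dict.contains_mk,
      show String.singleton 'o' = "o" from by decide]
    apply PySem.Dict.ext
    simp [PySem.Dict.items_insert_of_contains, PySem.Dict.contains_mk]
  by_cases h3 : qc = 'p'
  · subst h3
    simp [mkD, cellHit, PySem.Dict.contains_mk,
      show String.singleton 'p' = "p" from by decide]
    apply PySem.Dict.ext
    simp [PySem.Dict.items_insert_of_contains, PySem.Dict.contains_mk]
  by_cases h4 : qc = 't'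
  · subst h4
    simp [mkD, cellHit, PySem.Dict.contains_mk,
      show String.singleton 't' = "t" from by decide]
    apply PySem.Dict.ext
    simp [PySem.Dict.items_insert_of_contains, PySem.Dict.contains_mk]
  · have n1 := ne_singleton_of_toList (k := "r") (by decide) h1
    have n2 := ne_singleton_of_toList (k := "o") (by decide) h2
    have n3 := ne_singleton_of_toList (k := "p") (by decide) h3
    have n4 := ne_singleton_of_toList (k := "t") (by decide) h4
    simp [mkD, cellHit, PySem.Dict.contains_mk, h1, h2, h3, h4, n1, n2, n3, n4]

-- A's inner loop over a row, on the four-key dict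
theorem innerA_mkD (cells : List (Int × Char)) (y : Int) (a b c d : Option (Int × Int)) :
    cells.foldl (fun d q =>
        if d.contains (String.singleton q.2) then
          d.insert (String.singleton q.2)
            (some (q.1 * pvBlock + PySem.Int.floordiv pvBlock 2,
                   y * pvBlock + PySem.Int.floordiv pvBlock 2))
        else d) (mkD a b c d)
    = mkD (cells.foldl (fun v q => (cellHit 'r' y q).or v) a)
          (cells.foldl (fun v q => (cellHit 'o' y q).or v) b)
          (cells.foldl (fun v q => (cellHit 'p' y q).or v) c)
          (cells.foldl (fun v q => (cellHit 't' y q).or v) d) := by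
  induction cells generalizing a b c d with
  | nil => rfl
  | cons q rest ih => rw [List.foldl_cons, stepA_mkD]; exact ih _ _ _ _

-- A's outer loop, on the four-key dict
theorem outerA_mkD (rows : List (Int × String)) (a b c d : Option (Int × Int)) :
    rows.foldl (fun d p =>
        (PySem.List.enumerate p.2.toList 0).foldl (fun d q =>
          if d.contains (String.singleton q.2) then
            d.insert (String.singleton q.2)
              (some (q.1 * pvBlock + PySem.Int.floordiv pvBlock 2,
                     p.1 * pvBlock + PySem.Int.floordiv pvBlock 2))
          else d) d) (mkD a b c d)
    = mkD (rows.foldl (fun v p => (rowHit 'r' p.1 p.2.toList).or v) a)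
          (rows.foldl (fun v p => (rowHit 'o' p.1 p.2.toList).or v) b)
          (rows.foldl (fun v p => (rowHit 'p' p.1 p.2.toList).or v) c)
          (rows.foldl (fun v p => (rowHit 't' p.1 p.2.toList).or v) d) := by
  induction rows generalizing a b c d with
  | nil => rfl
  | cons p rest ih =>
      rw [List.foldl_cons, innerA_mkD]
      rw [List.foldl_cons, List.foldl_cons, List.foldl_cons, List.foldl_cons]
      rw [foldl_or_eq_findSome_reverse, foldl_or_eq_findSome_reverse,
          foldl_or_eq_findSome_reverse, foldl_or_eq_findSome_reverse]
      exact ih _ _ _ _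

-- B's inner loop is a findSome? over its index list
theorem fgpInner_eq_findSome (row : List Char) (ch : Char) (y : Int) (xs : List Int) :
    fgpInner row ch y xs
    = xs.findSome? (fun x => cellHit ch y (x, PySem.List.pyGetD row x ' ')) := by
  induction xs with
  | nil => rfl
  | cons x rest ih =>
      simp only [fgpInner, List.findSome?_cons, cellHit]
      by_cases h : PySem.List.pyGetD row x ' ' = ch
      · simp [h]
      · simp [h, ih, cellHit]

-- B's per-row backward scan computes rowHit
theorem fgpInner_eq_rowHit (row : List Char) (ch : Char) (y : Int) :
    fgpInner row ch y (PySem.List.pyRange ((row.length : Int) - 1) (-1) (-1))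
    = rowHit ch y row := by
  rw [fgpInner_eq_findSome, rowHit, PySem.List.enumerate_eq_map_pyRange row ' ',
      ← List.map_reverse, List.findSome?_map, PySem.List.pyRange_neg_one_eq_reverse]
  simp only [Function.comp_def]
  norm_num [PySem.List.len_eq]

-- B's outer loop is a findSome? over its row-index list
theorem fgpRows_eq_findSome (layout : List String) (ch : Char) (ys : List Int) :
    fgpRows layout ch ys
    = ys.findSome? (fun y => rowHit ch y (PySem.List.pyGetD layout y "").toList) := by
  induction ys with
  | nil => rfl
  | cons y rest ih =>
      simp only [fgpRows, List.findSome?_cons, fgpInner_eq_rowHit]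
      cases h : rowHit ch y (PySem.List.pyGetD layout y "").toList with
      | none => simp [ih]
      | some r => simp

-- the common value of the two programs for one ghost character
theorem per_char (layout : List String) (ch : Char) :
    (PySem.List.enumerate layout 0).foldl
        (fun v p => (rowHit ch p.1 p.2.toList).or v) none
    = fgpRows layout ch (PySem.List.pyRange ((layout.length : Int) - 1) (-1) (-1)) := by
  rw [foldl_or_eq_findSome_reverse, Option.or_none, fgpRows_eq_findSome,
      PySem.List.enumerate_eq_map_pyRange layout "",
      ← List.map_reverse, List.findSome?_map, PySem.List.pyRange_neg_one_eq_reverse]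
  simp only [Function.comp_def]
  norm_num [PySem.List.len_eq]

-- ===== VERDICT (by name: the statement is the Claim_ definition above) =====
theorem finde_geister_positionen_spec : Claim_equal_finde_geister_positionen := by
  intro layout _
  unfold Spec_finde_geister_positionen finde_geister_positionen finde_geister_positionen_alt
  rw [show (PySem.Dict.ofList [("r", none), ("o", none), ("p", none), ("t", none)]
        : PySem.Dict String (Option (Int × Int))) = mkD none none none none from by decide]
  rw [outerA_mkD]
  simp only [List.map_cons, List.map_nil]
  rw [← per_char layout 'r', ← per_char layout 'o', ← per_char layout 'p', ← per_char layout 't']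
  simp [mkD, show String.singleton 'r' = "r" from by decide,
        show String.singleton 'o' = "o" from by decide,
        show String.singleton 'p' = "p" from by decide,
        show String.singleton 't' = "t" from by decide]
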